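-- pv_equiv track=rewrite | github.com/LorenaPujante/MimicIII_BDOG_Benchmark | runTests.py | getArrayQueries
-- ===== SOURCE A (Python) =====
-- queryNames = ['1', '2', '2p', '3']#, '4', '4p', '5', '6', '6m']
--
-- def getArrayQueries(db):
--     arrayQueries = []
--     for i in range(len(queryNames)):
--         qName = queryNames[i]
--
--         if qName == "1":
--             arrayQueries.append([])
--             arrayQueries[i].append(db + " " + qName + " 2000-01-01T00:00:00 2000-01-16T00:00:00 80155 17")
--             #arrayQueries[i].append(db + " 1 2000-02-01T00:00:00 2000-02-16T00:00:00 80155 17")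
--
--         if qName == "2"  or  qName == "2p":
--             arrayQueries.append([])
--             arrayQueries[i].append(db + " " + qName + " 2000-01-14T00:00:00 2000-01-30T00:00:00 80155 5193")
--
--         if qName == "3":
--             arrayQueries.append([])
--             arrayQueries[i].append(db + " " + qName + " 2000-01-14T00:00:00 2000-01-30T00:00:00 31935 82642")
--
--         if qName == "4"  or  qName == "4p":
--             arrayQueries.append([])
--             arrayQueries[i].append(db + " " + qName + " 2000-01-14T00:00:00 2000-01-30T00:00:00 31935 82642")
--
--         if qName == "5":
--             arrayQueries.append([])
--             arrayQueries[i].append(db + " " + qName + " 2000-01-14T00:00:00 2000-01-30T00:00:00 80155 5193 31935 82642 13181 21040")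
--
--         if qName == "6"  or  qName == "6m":
--             arrayQueries.append([])
--             arrayQueries[i].append(db + " " + qName + " 2000-01-14T00:00:00 2000-01-30T00:00:00 3 0c 80155")
--
--     return arrayQueries
-- ===== SOURCE B (Python) =====
-- queryNames = ['1', '2', '2p', '3']
--
-- # Constant text block: one line per query, "name tail", in queryNames order.
-- _SUFFIX_BLOCK = (
--     "1 2000-01-01T00:00:00 2000-01-16T00:00:00 80155 17\n"
--     "2 2000-01-14T00:00:00 2000-01-30T00:00:00 80155 5193\n"
--     "2p 2000-01-14T00:00:00 2000-01-30T00:00:00 80155 5193\n"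
--     "3 2000-01-14T00:00:00 2000-01-30T00:00:00 31935 82642"
-- )
--
-- def getArrayQueries(db):
--     return [[db + " " + line] for line in _SUFFIX_BLOCK.split("\n")]
-- ===== Notes on version B (the rewrite author's own statement) =====
-- stated objective: simpler
-- what changed: Replaces the indexed loop with its per-name if-chain and append-then-mutate-cell-i bookkeeping by a constant multi-line text block of ready-made per-query suffix lines that is split on newlines and prefixed with db, one one-element row per line.
import Mathlib
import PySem

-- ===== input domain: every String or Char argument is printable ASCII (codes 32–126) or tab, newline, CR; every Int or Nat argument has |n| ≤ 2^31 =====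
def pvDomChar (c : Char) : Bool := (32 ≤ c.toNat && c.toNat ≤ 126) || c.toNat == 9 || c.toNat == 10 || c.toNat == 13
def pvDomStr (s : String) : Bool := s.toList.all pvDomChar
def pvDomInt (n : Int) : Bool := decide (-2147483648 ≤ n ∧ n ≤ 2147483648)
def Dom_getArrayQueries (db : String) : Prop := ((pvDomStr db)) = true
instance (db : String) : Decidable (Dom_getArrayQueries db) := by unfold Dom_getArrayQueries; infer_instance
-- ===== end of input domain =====

-- B replaces A's indexed loop + if-chain (append [] then mutate cell i) by splitting a
-- constant multi-line text block of per-query suffix lines and prefixing each line with db (objective: simpler).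

-- ===== PORT A =====
def queryNamesA : List String := ["1", "2", "2p", "3"]

-- body of A's loop for index i: each matching if-branch appends [] then appends the
-- formatted string to cell i (ported as List.modify on the freshly appended cell)
def getArrayQueriesStep (db : String) (acc : List (List String)) (i : Nat) : List (List String) :=
  let qName := (PySem.List.pyGet? queryNamesA (Int.ofNat i)).getD ""  -- in range for every i the loop visits
  let acc :=
    if qName == "1" then
      (acc ++ [[]]).modify i (fun row => row ++ [db ++ " " ++ qName ++ " 2000-01-01T00:00:00 2000-01-16T00:00:00 80155 17"])
    else acc
  let acc :=
    if qName == "2" || qName == "2p" then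
      (acc ++ [[]]).modify i (fun row => row ++ [db ++ " " ++ qName ++ " 2000-01-14T00:00:00 2000-01-30T00:00:00 80155 5193"])
    else acc
  let acc :=
    if qName == "3" then
      (acc ++ [[]]).modify i (fun row => row ++ [db ++ " " ++ qName ++ " 2000-01-14T00:00:00 2000-01-30T00:00:00 31935 82642"])
    else acc
  let acc :=
    if qName == "4" || qName == "4p" then
      (acc ++ [[]]).modify i (fun row => row ++ [db ++ " " ++ qName ++ " 2000-01-14T00:00:00 2000-01-30T00:00:00 31935 82642"])
    else acc
  let acc :=
    if qName == "5" then
      (acc ++ [[]]).modify i (fun row => row ++ [db ++ " " ++ qName ++ " 2000-01-14T00:00:00 2000-01-30T00:00:00 80155 5193 31935 82642 13181 21040"])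
    else acc
  let acc :=
    if qName == "6" || qName == "6m" then
      (acc ++ [[]]).modify i (fun row => row ++ [db ++ " " ++ qName ++ " 2000-01-14T00:00:00 2000-01-30T00:00:00 3 0c 80155"])
    else acc
  acc

def getArrayQueries (db : String) : List (List String) :=
  (List.range queryNamesA.length).foldl (getArrayQueriesStep db) []

-- ===== PORT B =====
def suffixBlock : String :=
  "1 2000-01-01T00:00:00 2000-01-16T00:00:00 80155 17\n" ++
  "2 2000-01-14T00:00:00 2000-01-30T00:00:00 80155 5193\n" ++
  "2p 2000-01-14T00:00:00 2000-01-30T00:00:00 80155 5193\n" ++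
  "3 2000-01-14T00:00:00 2000-01-30T00:00:00 31935 82642"

def getArrayQueries_alt (db : String) : List (List String) :=
  ((PySem.Str.split? suffixBlock "\n").getD []).map (fun line => [db ++ " " ++ line])

-- ===== PRECONDITION & SPEC =====
def Spec_getArrayQueries (db : String) (out : List (List String)) : Prop := out = getArrayQueries_alt db
instance (db : String) (out : List (List String)) : Decidable (Spec_getArrayQueries db out) := by unfold Spec_getArrayQueries; infer_instance

-- ===== CLAIM (what is proved, stated in full; the proofs are below) =====
def Claim_equal_getArrayQueries : Prop := ∀ (db : String), Dom_getArrayQueries db → Spec_getArrayQueries db (getArrayQueries db)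

-- ===== LEMMAS AND PROOFS =====
-- the constant block splits into its four lines
set_option maxRecDepth 4000 in
theorem split_suffixBlock :
    (PySem.Str.split? suffixBlock "\n").getD [] =
      ["1 2000-01-01T00:00:00 2000-01-16T00:00:00 80155 17",
       "2 2000-01-14T00:00:00 2000-01-30T00:00:00 80155 5193",
       "2p 2000-01-14T00:00:00 2000-01-30T00:00:00 80155 5193",
       "3 2000-01-14T00:00:00 2000-01-30T00:00:00 31935 82642"] := by decide

-- ===== VERDICT (by name: the statement is the Claim_ definition above) =====
theorem getArrayQueries_spec : Claim_equal_getArrayQueries := by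
  intro db _
  show getArrayQueries db = getArrayQueries_alt db
  simp [getArrayQueries, getArrayQueries_alt, getArrayQueriesStep, List.range_succ,
    queryNamesA, PySem.List.pyGet?, PySem.List.pyIdx?, split_suffixBlock,
    List.modify, String.append_assoc]
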